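-- pv_equiv track=rewrite | github.com/brownauro2520/shashwatpatnaik.github.io | Code/CFD Proj 4 (Mesh Adaptation and Local Refinement)/python/smoothing.py | calcneigh
-- ===== SOURCE A (Python) =====
-- def calcneigh(E2N):
--     node_neighbors = {}
--     # iterate through the elements
--     for element in E2N:
--         # iterate through the nodes in the current element
--         for node in element:
--             # check if the node is already in the dictionary
--             if node not in node_neighbors:
--                 node_neighbors[node] = []
--             # add the two neighboring nodes to the set of neighbors
--             for neighbors in element:
--                 if neighbors != node and not neighbors in node_neighbors[node]:
--                     node_neighbors[node].append(neighbors)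
--     return node_neighbors
-- ===== SOURCE B (Python) =====
-- def calcneigh(E2N):
--     # Pass 1: inverted index node -> the elements containing it (one entry per occurrence)
--     node2elems = {}
--     for element in E2N:
--         for node in element:
--             node2elems.setdefault(node, []).append(element)
--     # Pass 2: per node, first-occurrence-ordered union of its elements, minus the node itself
--     return {node: _union_minus(node, elems) for node, elems in node2elems.items()}
--
-- def _union_minus(node, elems):
--     seen = set()
--     neigh = []
--     for element in elems:
--         for n in element:
--             if n != node and n not in seen:
--                 seen.add(n)
--                 neigh.append(n)
--     return neigh
-- ===== Notes on version B (the rewrite author's own statement) =====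
-- stated objective: alternative
-- what changed: A interleaves everything in one triple-nested loop, deduplicating by a membership-checked append into per-node lists; B first builds an inverted index (node -> elements containing it) and then, per node, streams that node's elements once through a seen-set to produce the ordered union of neighbours.
import Mathlib
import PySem

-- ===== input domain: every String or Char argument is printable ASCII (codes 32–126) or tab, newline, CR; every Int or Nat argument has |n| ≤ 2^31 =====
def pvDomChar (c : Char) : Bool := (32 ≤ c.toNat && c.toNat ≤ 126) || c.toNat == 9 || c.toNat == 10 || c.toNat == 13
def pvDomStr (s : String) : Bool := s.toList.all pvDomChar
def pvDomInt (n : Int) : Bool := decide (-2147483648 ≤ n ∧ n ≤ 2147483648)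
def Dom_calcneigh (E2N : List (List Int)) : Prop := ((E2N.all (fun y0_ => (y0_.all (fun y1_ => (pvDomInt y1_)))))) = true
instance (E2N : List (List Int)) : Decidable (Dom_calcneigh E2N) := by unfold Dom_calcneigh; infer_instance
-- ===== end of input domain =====

-- B replaces A's single triple-nested loop (inline membership-checked appends) by an
-- inverted index node -> elements, then a per-node seen-set union pass; objective: alternative.

-- ===== PORT A =====
def calcneigh (E2N : List (List Int)) : List (Int × List Int) :=
  (E2N.foldl (fun nn element =>
      element.foldl (fun nn node =>
        let nn := if nn.contains node then nn else nn.insert node ([] : List Int)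
        element.foldl (fun nn neighbors =>
          let l := nn.getD node []
          if neighbors ≠ node ∧ neighbors ∉ l then nn.insert node (l ++ [neighbors]) else nn)
          nn)
        nn)
    PySem.Dict.empty).items

-- ===== PORT B =====
-- helper _union_minus: seen is a Python set kept as PySem.Set (first component), neigh the list
def pvUnionMinus (node : Int) (elems : List (List Int)) : List Int :=
  (elems.foldl (fun (sa : List Int × List Int) element =>
      element.foldl (fun (sa : List Int × List Int) n =>
        if n ≠ node ∧ n ∉ sa.1 then (PySem.Set.add sa.1 n, sa.2 ++ [n]) else sa) sa)
    (([] : List Int), ([] : List Int))).2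

def calcneigh_alt (E2N : List (List Int)) : List (Int × List Int) :=
  -- Pass 1: inverted index (setdefault(node, []).append(element))
  let node2elems := E2N.foldl (fun d element =>
      element.foldl (fun d node => d.modify node [] (fun l => l ++ [element])) d)
    (PySem.Dict.empty : PySem.Dict Int (List (List Int)))
  -- Pass 2: dict comprehension over node2elems.items() (keys are distinct, so items map is exact)
  node2elems.items.map (fun p => (p.1, pvUnionMinus p.1 p.2))

-- ===== PRECONDITION & SPEC =====
def Spec_calcneigh (E2N : List (List Int)) (out : List (Int × List Int)) : Prop := out = calcneigh_alt E2N
instance (E2N : List (List Int)) (out : List (Int × List Int)) : Decidable (Spec_calcneigh E2N out) := by unfold Spec_calcneigh; infer_instance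

-- ===== CLAIM (what is proved, stated in full; the proofs are below) =====
def Claim_equal_calcneigh : Prop := ∀ (E2N : List (List Int)), Dom_calcneigh E2N → Spec_calcneigh E2N (calcneigh E2N)

-- ===== LEMMAS AND PROOFS =====

-- A's per-node step (ensure the key, then the inner membership-checked append loop)
def pvAStep (element : List Int) (nn : PySem.Dict Int (List Int)) (node : Int) : PySem.Dict Int (List Int) :=
  let nn := if nn.contains node then nn else nn.insert node ([] : List Int)
  element.foldl (fun nn neighbors =>
    let l := nn.getD node []
    if neighbors ≠ node ∧ neighbors ∉ l then nn.insert node (l ++ [neighbors]) else nn) nn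

-- B's per-node step of pass 1
def pvBStep (element : List Int) (d : PySem.Dict Int (List (List Int))) (node : Int) : PySem.Dict Int (List (List Int)) :=
  d.modify node [] (fun l => l ++ [element])

-- what B eventually computes from a key's element list
def pvVal (k : Int) (elems : List (List Int)) : List Int :=
  PySem.List.dedup (elems.flatten.filter (fun n => decide (n ≠ k)))

-- the relation maintained between A's dict and B's inverted index
def pvInv (a : PySem.Dict Int (List Int)) (b : PySem.Dict Int (List (List Int))) : Prop :=
  a.keys = b.keys ∧ b.keys.Nodup ∧ ∀ k : Int, a.getD k [] = pvVal k (b.getD k [])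

-- A's inner loop only writes the key `node`: other keys keep their value
theorem pvInner_getD_ne (element : List Int) (node k : Int) (hk : k ≠ node)
    (d : PySem.Dict Int (List Int)) :
    (element.foldl (fun nn neighbors =>
        let l := nn.getD node []
        if neighbors ≠ node ∧ neighbors ∉ l then nn.insert node (l ++ [neighbors]) else nn) d).getD k []
      = d.getD k [] := by
  induction element generalizing d with
  | nil => rfl
  | cons x xs ih =>
    simp only [List.foldl_cons]
    split
    · rw [ih, PySem.Dict.getD_insert_of_ne _ _ _ hk]
    · exact ih d

-- at `node` A's inner loop computes the membership-checked list fold of its start value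
theorem pvInner_getD_self (element : List Int) (node : Int) (d : PySem.Dict Int (List Int)) :
    (element.foldl (fun nn neighbors =>
        let l := nn.getD node []
        if neighbors ≠ node ∧ neighbors ∉ l then nn.insert node (l ++ [neighbors]) else nn) d).getD node []
      = element.foldl (fun l neighbors =>
          if neighbors ≠ node ∧ neighbors ∉ l then l ++ [neighbors] else l) (d.getD node []) := by
  induction element generalizing d with
  | nil => rfl
  | cons x xs ih =>
    simp only [List.foldl_cons]
    split
    · rw [ih, PySem.Dict.getD_insert_self]
    · rw [ih]

-- A's inner loop never changes the key list once `node` is present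
theorem pvInner_keys (element : List Int) (node : Int) (d : PySem.Dict Int (List Int))
    (hc : d.contains node = true) :
    (element.foldl (fun nn neighbors =>
        let l := nn.getD node []
        if neighbors ≠ node ∧ neighbors ∉ l then nn.insert node (l ++ [neighbors]) else nn) d).keys
      = d.keys := by
  induction element generalizing d with
  | nil => rfl
  | cons x xs ih =>
    simp only [List.foldl_cons]
    split
    · rw [ih _ (PySem.Dict.contains_insert_self _ _ _), PySem.Dict.keys_insert_of_contains _ _ hc]
    · exact ih d hc

-- the membership-checked append fold is Set.update, so starting from a dedup it is dedup of the append
theorem pvListFold (element : List Int) (node : Int) (R : List Int) :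
    element.foldl (fun l neighbors =>
        if neighbors ≠ node ∧ neighbors ∉ l then l ++ [neighbors] else l) (PySem.List.dedup R)
      = PySem.List.dedup (R ++ element.filter (fun n => decide (n ≠ node))) := by
  have hfun : ∀ (l : List Int) (x : Int),
      (if x ≠ node ∧ x ∉ l then l ++ [x] else l)
        = (if x ≠ node then PySem.Set.add l x else l) := by
    intro l x
    by_cases hx : x = node
    · simp [hx]
    · by_cases hm : x ∈ l <;> simp [PySem.Set.add, PySem.Set.contains, hx, hm]
  calc element.foldl (fun l x => if x ≠ node ∧ x ∉ l then l ++ [x] else l) (PySem.List.dedup R)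
      = element.foldl (fun l x => if x ≠ node then PySem.Set.add l x else l) (PySem.List.dedup R) := by
        exact PySem.List.foldl_congr_mem _ _ _ _ (fun acc x _ => hfun acc x)
    _ = (element.filter (fun x => decide (x ≠ node))).foldl PySem.Set.add (PySem.List.dedup R) := by
        rw [PySem.List.foldl_ite_eq_foldl_filter]
    _ = PySem.List.dedup (R ++ element.filter (fun n => decide (n ≠ node))) := by
        rw [PySem.List.dedup_eq_ofList, PySem.List.dedup_eq_ofList,
            PySem.Set.ofList_eq_foldl, PySem.Set.ofList_eq_foldl, List.foldl_append]

-- one node step preserves the relation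
theorem pvStep (element : List Int) (node : Int) (a : PySem.Dict Int (List Int))
    (b : PySem.Dict Int (List (List Int)))
    (h : pvInv a b) : pvInv (pvAStep element a node) (pvBStep element b node) := by
  obtain ⟨hkeys, hnd, hget⟩ := h
  have hca : a.contains node = decide (node ∈ b.keys) := by
    rw [PySem.Dict.contains_eq_decide_mem_keys, hkeys]
  have hcb : b.contains node = decide (node ∈ b.keys) := PySem.Dict.contains_eq_decide_mem_keys _ _
  have hensure_keys : (if a.contains node then a else a.insert node ([] : List Int)).keys
      = if node ∈ b.keys then b.keys else b.keys ++ [node] := by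
    by_cases hm : node ∈ b.keys
    · simp only [hca, hm, decide_true, if_true, hkeys]
    · have : a.contains node = false := by simp [hca, hm]
      simp only [this, Bool.false_eq_true, if_false, hm,
        PySem.Dict.keys_insert_of_not_contains _ _ this, hkeys]
  have hensure_contains : (if a.contains node then a else a.insert node ([] : List Int)).contains node = true := by
    rw [PySem.Dict.contains_eq_decide_mem_keys, hensure_keys]
    by_cases hm : node ∈ b.keys <;> simp [hm]
  have hensure_getD : ∀ k : Int,
      (if a.contains node then a else a.insert node ([] : List Int)).getD k [] = a.getD k [] ∨
      (k = node ∧ (if a.contains node then a else a.insert node ([] : List Int)).getD k [] = []) := by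
    intro k
    by_cases hc : a.contains node
    · left; simp [hc]
    · by_cases hk : k = node
      · right; exact ⟨hk, by simp [hc, hk, PySem.Dict.getD_insert_self]⟩
      · left; simp [hc, PySem.Dict.getD_insert_of_ne _ _ _ hk]
  refine ⟨?_, ?_, ?_⟩
  · rw [pvAStep, pvInner_keys _ _ _ hensure_contains, hensure_keys, pvBStep,
        PySem.Dict.keys_modify]
    by_cases hm : node ∈ b.keys
    · rw [PySem.Dict.keys_insert_of_contains _ _ (by simp [hcb, hm])]
      simp [hm]
    · rw [PySem.Dict.keys_insert_of_not_contains _ _ (by simp [hcb, hm])]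
      simp [hm]
  · rw [pvBStep, PySem.Dict.keys_modify]
    by_cases hm : node ∈ b.keys
    · rwa [PySem.Dict.keys_insert_of_contains _ _ (by simp [hcb, hm])]
    · rw [PySem.Dict.keys_insert_of_not_contains _ _ (by simp [hcb, hm])]
      simp only [List.nodup_append, List.nodup_singleton, true_and]
      refine ⟨hnd, ?_⟩
      intro x hx y hy
      simp only [List.mem_singleton] at hy
      exact fun he => hm ((hy ▸ he) ▸ hx)
  · intro k
    by_cases hk : k = node
    · subst hk
      rw [pvAStep, pvInner_getD_self, pvBStep, PySem.Dict.getD_modify]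
      simp only [if_pos trivial]
      have hstart : (if a.contains k then a else a.insert k ([] : List Int)).getD k []
          = PySem.List.dedup ((b.getD k []).flatten.filter (fun n => decide (n ≠ k))) := by
        by_cases hm : k ∈ b.keys
        · have : a.contains k = true := by simp [hca, hm]
          rw [if_pos this]; exact hget k
        · have hcaf : a.contains k = false := by simp [hca, hm]
          have hcbf : b.contains k = false := by simp [hcb, hm]
          rw [if_neg (by simp [hcaf]), PySem.Dict.getD_insert_self,
              PySem.Dict.getD_of_not_contains b [] hcbf]
          rfl
      rw [hstart, pvListFold, pvVal]
      simp [List.filter_append]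
    · rw [pvAStep, pvInner_getD_ne _ _ _ hk, pvBStep, PySem.Dict.getD_modify, if_neg hk]
      rcases hensure_getD k with h1 | ⟨h2, _⟩
      · rw [h1]; exact hget k
      · exact absurd h2 hk

-- the relation propagates through one element (fold over its nodes)
theorem pvElemFold (element : List Int) (nodes : List Int) (a : PySem.Dict Int (List Int))
    (b : PySem.Dict Int (List (List Int)))
    (h : pvInv a b) : pvInv (nodes.foldl (pvAStep element) a) (nodes.foldl (pvBStep element) b) := by
  induction nodes generalizing a b with
  | nil => exact h
  | cons x xs ih => exact ih _ _ (pvStep element x a b h)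

-- the relation propagates through the whole mesh
theorem pvMeshFold (E2N : List (List Int)) (a : PySem.Dict Int (List Int))
    (b : PySem.Dict Int (List (List Int))) (h : pvInv a b) :
    pvInv (E2N.foldl (fun nn element => element.foldl (pvAStep element) nn) a)
          (E2N.foldl (fun d element => element.foldl (pvBStep element) d) b) := by
  induction E2N generalizing a b with
  | nil => exact h
  | cons e es ih => exact ih _ _ (pvElemFold e e a b h)

-- B's seen-set/accumulator pair stays equal componentwise and its list is the membership fold
theorem pvPairFoldInner (ns : List Int) (k : Int) (acc : List Int) :
    ns.foldl (fun (sa : List Int × List Int) n =>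
        if n ≠ k ∧ n ∉ sa.1 then (PySem.Set.add sa.1 n, sa.2 ++ [n]) else sa) (acc, acc)
      = (ns.foldl (fun l n => if n ≠ k ∧ n ∉ l then l ++ [n] else l) acc,
         ns.foldl (fun l n => if n ≠ k ∧ n ∉ l then l ++ [n] else l) acc) := by
  induction ns generalizing acc with
  | nil => rfl
  | cons x xs ih =>
    simp only [List.foldl_cons]
    by_cases hx : x ≠ k ∧ x ∉ acc
    · rw [if_pos hx, if_pos hx]
      have : PySem.Set.add acc x = acc ++ [x] := by
        simp [PySem.Set.add, PySem.Set.contains, hx.2]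
      rw [this]; exact ih (acc ++ [x])
    · rw [if_neg hx, if_neg hx]; exact ih acc

-- pass 2's helper computes exactly pvVal
theorem pvUnionMinus_eq (k : Int) (elems : List (List Int)) :
    pvUnionMinus k elems = pvVal k elems := by
  rw [pvUnionMinus]
  have h : ∀ (elems : List (List Int)) (acc : List Int),
      elems.foldl (fun (sa : List Int × List Int) element =>
        element.foldl (fun (sa : List Int × List Int) n =>
          if n ≠ k ∧ n ∉ sa.1 then (PySem.Set.add sa.1 n, sa.2 ++ [n]) else sa) sa)
      (acc, acc)
      = (elems.flatten.foldl (fun l n => if n ≠ k ∧ n ∉ l then l ++ [n] else l) acc,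
         elems.flatten.foldl (fun l n => if n ≠ k ∧ n ∉ l then l ++ [n] else l) acc) := by
    intro elems
    induction elems with
    | nil => intro acc; rfl
    | cons e es ih =>
      intro acc
      simp only [List.foldl_cons, List.flatten_cons, List.foldl_append]
      rw [pvPairFoldInner]
      exact ih _
  rw [h]
  have := pvListFold elems.flatten k []
  simpa [pvVal] using this

-- a pair of related dicts: A's items = the pvUnionMinus-mapped items of B's index
theorem pvFinal (a : PySem.Dict Int (List Int)) (b : PySem.Dict Int (List (List Int)))
    (h : pvInv a b) :
    a.items = b.items.map (fun p => (p.1, pvUnionMinus p.1 p.2)) := by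
  obtain ⟨hkeys, hnd, hget⟩ := h
  rw [PySem.Dict.items_eq_map_keys a (hkeys ▸ hnd) [],
      PySem.Dict.items_eq_map_keys b hnd [], hkeys, List.map_map]
  exact List.map_congr_left (fun k _ => by simp [hget k, pvUnionMinus_eq])

-- ===== VERDICT (by name: the statement is the Claim_ definition above) =====
theorem calcneigh_spec : Claim_equal_calcneigh := by
  intro E2N _
  show calcneigh E2N = calcneigh_alt E2N
  exact pvFinal _ _ (pvMeshFold E2N PySem.Dict.empty PySem.Dict.empty
    ⟨rfl, List.nodup_nil, fun _ => rfl⟩)
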